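-- pv_equiv track=rewrite | github.com/SumitKumar-173/GoQuant-Assignment | src/sentiment_analysis/analyzer.py | detect_sarcasm_and_irony
-- ===== SOURCE A (Python) =====
-- def detect_sarcasm_and_irony(text: str) -> bool:
--     """
--     Basic sarcasm/irony detection (to be expanded in advanced version)
--     """
--     # Simple pattern matching for basic sarcasm indicators
--     sarcasm_indicators = [
--         "yeah right", "sure thing", "oh great", "fantastic", "wonderful",
--         "as if", "like that's", "not surprised", "oh really", "oh sure",
--         "because that makes sense", "right", "totally", "obviously"
--     ]
--
--     text_lower = text.lower()
--     for indicator in sarcasm_indicators: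
--         if indicator in text_lower:
--             return True
--
--     # Check for contrasting positive/negative sentiment in close proximity
--     positive_indicators = ['great', 'amazing', 'fantastic', 'wonderful', 'perfect']
--     negative_indicators = ['terrible', 'awful', 'horrible', 'disaster', 'horrendous']
--
--     words = text_lower.split()
--     for i, word in enumerate(words):
--         if word in positive_indicators:
--             # Check nearby words for contradiction
--             start = max(0, i - 5)
--             end = min(len(words), i + 6)
--             nearby_words = words[start:end]
--
--             for neg_word in negative_indicators:
--                 if neg_word in nearby_words:
--                     return True
--
--     return False
-- ===== SOURCE B (Python) =====
-- def detect_sarcasm_and_irony(text: str) -> bool: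
--     sarcasm_indicators = [
--         "yeah right", "sure thing", "oh great", "fantastic", "wonderful",
--         "as if", "like that's", "not surprised", "oh really", "oh sure",
--         "because that makes sense", "right", "totally", "obviously"
--     ]
--     text_lower = text.lower()
--     if any(indicator in text_lower for indicator in sarcasm_indicators):
--         return True
--
--     positive_indicators = ('great', 'amazing', 'fantastic', 'wonderful', 'perfect')
--     negative_indicators = ('terrible', 'awful', 'horrible', 'disaster', 'horrendous')
--
--     # One pass: remember the index of the most recent positive / negative word;
--     # a contrast exists iff some positive and some negative word are at most 5 apart.
--     last_pos = None
--     last_neg = None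
--     for i, word in enumerate(text_lower.split()):
--         if word in positive_indicators:
--             if _near(i, last_neg):
--                 return True
--             last_pos = i
--         elif word in negative_indicators:
--             if _near(i, last_pos):
--                 return True
--             last_neg = i
--     return False
--
--
-- def _near(i, last):
--     return last is not None and i - last <= 5
-- ===== Notes on version B (the rewrite author's own statement) =====
-- stated objective: alternative
-- what changed: The per-positive-word window slicing (slice words[i-5:i+6] and scan it for each negative word) is replaced by a single pass over the words that remembers only the index of the most recent positive and most recent negative word and fires when the current word's counterpart occurred at most 5 words back.
import Mathlib
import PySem

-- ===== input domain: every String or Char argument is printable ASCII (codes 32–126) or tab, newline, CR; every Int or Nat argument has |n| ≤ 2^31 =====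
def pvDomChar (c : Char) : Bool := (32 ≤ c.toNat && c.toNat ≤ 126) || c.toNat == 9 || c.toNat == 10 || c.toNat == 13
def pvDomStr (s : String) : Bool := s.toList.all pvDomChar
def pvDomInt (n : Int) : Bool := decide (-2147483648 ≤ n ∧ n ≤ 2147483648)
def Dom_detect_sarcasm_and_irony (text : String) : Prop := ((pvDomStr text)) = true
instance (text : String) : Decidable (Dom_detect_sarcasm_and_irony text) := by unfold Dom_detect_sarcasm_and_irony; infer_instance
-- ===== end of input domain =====

-- B replaces A's per-positive-word window slicing (slice words[i-5:i+6], scan the negative list)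
-- by a single pass that remembers the index of the most recent positive/negative word (objective: alternative one-pass algorithm, O(1) state).


-- ===== PORT A =====
def pvA_sarcasm_indicators : List String :=
  ["yeah right", "sure thing", "oh great", "fantastic", "wonderful",
   "as if", "like that's", "not surprised", "oh really", "oh sure",
   "because that makes sense", "right", "totally", "obviously"]
def pvA_positive_indicators : List String := ["great", "amazing", "fantastic", "wonderful", "perfect"]
def pvA_negative_indicators : List String := ["terrible", "awful", "horrible", "disaster", "horrendous"]

def detect_sarcasm_and_irony (text : String) : Bool :=
  let text_lower := PySem.Str.lower text
  if pvA_sarcasm_indicators.any (fun indicator => PySem.Str.isIn indicator text_lower) then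
    true
  else
    let words := PySem.Str.split₀ text_lower
    (PySem.List.enumerate words 0).any (fun iw =>
      if pvA_positive_indicators.contains iw.2 then
        let start := max 0 (iw.1 - 5)
        let stop := min (PySem.List.len words) (iw.1 + 6)
        let nearby_words := PySem.List.slice words (some start) (some stop)
        pvA_negative_indicators.any (fun neg_word => nearby_words.contains neg_word)
      else false)

-- ===== PORT B =====
def pvB_sarcasm_indicators : List String :=
  ["yeah right", "sure thing", "oh great", "fantastic", "wonderful",
   "as if", "like that's", "not surprised", "oh really", "oh sure",
   "because that makes sense", "right", "totally", "obviously"]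
def pvB_positive_indicators : List String := ["great", "amazing", "fantastic", "wonderful", "perfect"]
def pvB_negative_indicators : List String := ["terrible", "awful", "horrible", "disaster", "horrendous"]

-- helper _near(i, last): last is not None and i - last <= 5
def pvB_near (i : Int) : Option Int → Bool
  | some j => decide (i - j ≤ 5)
  | none => false

-- one pass over the enumerated words, state = index of most recent positive / negative word
def pvB_contrastLoop : List (Int × String) → Option Int → Option Int → Bool
  | [], _, _ => false
  | (i, word) :: rest, last_pos, last_neg =>
    if pvB_positive_indicators.contains word then
      if pvB_near i last_neg then true
      else pvB_contrastLoop rest (some i) last_neg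
    else if pvB_negative_indicators.contains word then
      if pvB_near i last_pos then true
      else pvB_contrastLoop rest last_pos (some i)
    else pvB_contrastLoop rest last_pos last_neg

def detect_sarcasm_and_irony_alt (text : String) : Bool :=
  let text_lower := PySem.Str.lower text
  if pvB_sarcasm_indicators.any (fun indicator => PySem.Str.isIn indicator text_lower) then
    true
  else
    pvB_contrastLoop (PySem.List.enumerate (PySem.Str.split₀ text_lower) 0) none none

-- ===== PRECONDITION & SPEC =====
def Spec_detect_sarcasm_and_irony (text : String) (out : Bool) : Prop := out = detect_sarcasm_and_irony_alt text
instance (text : String) (out : Bool) : Decidable (Spec_detect_sarcasm_and_irony text out) := by unfold Spec_detect_sarcasm_and_irony; infer_instance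

-- ===== CLAIM (what is proved, stated in full; the proofs are below) =====
def Claim_equal_detect_sarcasm_and_irony : Prop := ∀ (text : String), Dom_detect_sarcasm_and_irony text → Spec_detect_sarcasm_and_irony text (detect_sarcasm_and_irony text)

-- ===== LEMMAS AND PROOFS =====

-- "some positive word and some negative word at most 5 words apart" — the common characterisation
def HasContrast (ws : List String) : Prop :=
  ∃ i j : Nat, i < ws.length ∧ j < ws.length ∧
    pvA_positive_indicators.contains (ws.getD i "") = true ∧
    pvA_negative_indicators.contains (ws.getD j "") = true ∧
    i ≤ j + 5 ∧ j ≤ i + 5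

lemma pvB_near_iff (i : Int) (o : Option Int) : pvB_near i o = true ↔ ∃ j, o = some j ∧ i - j ≤ 5 := by
  cases o <;> simp [pvB_near]

lemma pv_disjointB (w : String) (h : pvB_positive_indicators.contains w = true) :
    pvB_negative_indicators.contains w = false := by
  simp only [pvB_positive_indicators, List.contains_eq_mem, decide_eq_true_eq,
    List.mem_cons, List.not_mem_nil, or_false] at h
  rcases h with h | h | h | h | h <;> subst h <;> decide

-- membership in A's clamped window slice words[max(0,k-5) : min(len,k+6)]
lemma pv_mem_window (ws : List String) (k : Nat) (g : String) :
    g ∈ PySem.List.slice ws (some (max 0 ((k : Int) - 5)))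
          (some (min (PySem.List.len ws) ((k : Int) + 6))) ↔
      ∃ m : Nat, m < ws.length ∧ ws.getD m "" = g ∧ (k : Int) - 5 ≤ (m : Int) ∧ (m : Int) < (k : Int) + 6 := by
  have ha : (0:Int) ≤ max 0 ((k : Int) - 5) := le_max_left _ _
  have hb : (0:Int) ≤ min (PySem.List.len ws) ((k : Int) + 6) := by
    refine le_min ?_ (by positivity)
    rw [PySem.List.len_eq]; positivity
  rw [PySem.List.slice_toNat ws ha hb]
  have hat : (max 0 ((k : Int) - 5)).toNat = k - 5 := by omega
  have hbt : (min (PySem.List.len ws) ((k : Int) + 6)).toNat = min ws.length (k + 6) := by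
    rw [PySem.List.len_eq]; omega
  rw [hat, hbt]
  constructor
  · intro hg
    obtain ⟨q, hq, hgq⟩ := List.mem_iff_getElem.mp hg
    rw [List.getElem_take, List.getElem_drop] at hgq
    simp only [List.length_take, List.length_drop] at hq
    refine ⟨(k - 5) + q, by omega, ?_, by omega, by omega⟩
    rw [List.getD_eq_getElem ws "" (by omega)]
    exact hgq
  · rintro ⟨m, hm, hgd, h1, h2⟩
    rw [List.getD_eq_getElem ws "" hm] at hgd
    rw [List.mem_iff_getElem]
    refine ⟨m - (k - 5), ?_, ?_⟩
    · simp only [List.length_take, List.length_drop]; omega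
    · rw [List.getElem_take, List.getElem_drop]
      have : (k - 5) + (m - (k - 5)) = m := by omega
      simp_rw [this]; exact hgd

-- A's contrast scan detects exactly HasContrast
lemma pv_A_contrast_iff (ws : List String) :
    ((PySem.List.enumerate ws 0).any (fun iw =>
      if pvA_positive_indicators.contains iw.2 then
        pvA_negative_indicators.any (fun neg_word =>
          (PySem.List.slice ws (some (max 0 (iw.1 - 5)))
            (some (min (PySem.List.len ws) (iw.1 + 6)))).contains neg_word)
      else false) = true) ↔ HasContrast ws := by
  rw [List.any_eq_true]
  constructor
  · rintro ⟨p, hp, hfp⟩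
    rw [PySem.List.mem_enumerate_iff] at hp
    obtain ⟨k, hk, rfl⟩ := hp
    simp only [zero_add] at hfp
    by_cases hP : pvA_positive_indicators.contains ws[k] = true
    · rw [if_pos hP, List.any_eq_true] at hfp
      obtain ⟨g, hgneg, hgsl⟩ := hfp
      rw [List.contains_iff_mem, pv_mem_window] at hgsl
      obtain ⟨m, hm, hgd, h1, h2⟩ := hgsl
      refine ⟨k, m, hk, hm, ?_, ?_, by omega, by omega⟩
      · rw [List.getD_eq_getElem ws "" hk]; exact hP
      · rw [List.contains_iff_mem, hgd]; exact hgneg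
    · rw [if_neg hP] at hfp; exact absurd hfp (by simp)
  · rintro ⟨i, j, hi, hj, hP, hN, h1, h2⟩
    refine ⟨((i : Int), ws[i]), ?_, ?_⟩
    · rw [PySem.List.mem_enumerate_iff]; exact ⟨i, hi, by simp⟩
    · simp only []
      rw [List.getD_eq_getElem ws "" hi] at hP
      rw [if_pos hP, List.any_eq_true]
      refine ⟨ws.getD j "", ?_, ?_⟩
      · rw [← List.contains_iff_mem]; exact hN
      · rw [List.contains_iff_mem, pv_mem_window]
        exact ⟨j, hj, rfl, by omega, by omega⟩

-- B's one-pass loop, generalized over the running state: it fires iff some word has a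
-- counterpart among the earlier words (or the incoming state) at most 5 positions back
lemma pv_B_loop_iff (ws : List String) (s : Int) (lp ln : Option Int)
    (hlp : ∀ j, lp = some j → j ≤ s) (hln : ∀ j, ln = some j → j ≤ s) :
    pvB_contrastLoop (PySem.List.enumerate ws s) lp ln = true ↔
      ∃ k : Nat, k < ws.length ∧
        ((pvB_positive_indicators.contains (ws.getD k "") = true ∧
            ((∃ j, ln = some j ∧ s + (k : Int) - j ≤ 5) ∨
             (∃ m : Nat, m < k ∧ pvB_negative_indicators.contains (ws.getD m "") = true ∧ k - m ≤ 5)))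
        ∨ (pvB_negative_indicators.contains (ws.getD k "") = true ∧
            ((∃ j, lp = some j ∧ s + (k : Int) - j ≤ 5) ∨
             (∃ m : Nat, m < k ∧ pvB_positive_indicators.contains (ws.getD m "") = true ∧ k - m ≤ 5)))) := by
  induction ws generalizing s lp ln with
  | nil => simp [PySem.List.enumerate, pvB_contrastLoop]
  | cons w rest ih =>
    rw [PySem.List.enumerate_cons, pvB_contrastLoop]
    have hlp1 : ∀ j, (some s : Option Int) = some j → j ≤ s + 1 := by
      rintro j ⟨rfl⟩
      omega
    have hln1 : ∀ j, ln = some j → j ≤ s + 1 := fun j h => le_trans (hln j h) (by omega)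
    have hlp1' : ∀ j, lp = some j → j ≤ s + 1 := fun j h => le_trans (hlp j h) (by omega)
    by_cases hP : pvB_positive_indicators.contains w = true
    · rw [if_pos hP]
      have hNw : pvB_negative_indicators.contains w = false := pv_disjointB w hP
      by_cases hnear : pvB_near s ln = true
      · rw [if_pos hnear]
        obtain ⟨j, hje, hj5⟩ := (pvB_near_iff s ln).mp hnear
        refine ⟨fun _ => ⟨0, by simp, Or.inl ⟨by simpa using hP, Or.inl ⟨j, hje, by push_cast; omega⟩⟩⟩,
                fun _ => rfl⟩
      · rw [if_neg hnear, ih (s + 1) (some s) ln hlp1 hln1]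
        constructor
        · rintro ⟨k, hk, hcase⟩
          refine ⟨k + 1, by simpa using Nat.succ_lt_succ hk, ?_⟩
          rcases hcase with ⟨hPk, hcand⟩ | ⟨hNk, hcand⟩
          · refine Or.inl ⟨by simpa using hPk, ?_⟩
            rcases hcand with ⟨j, hje, hd⟩ | ⟨m, hmk, hNm, hle⟩
            · exact Or.inl ⟨j, hje, by push_cast at hd ⊢; omega⟩
            · exact Or.inr ⟨m + 1, by omega, by simpa using hNm, by omega⟩
          · refine Or.inr ⟨by simpa using hNk, ?_⟩
            rcases hcand with ⟨j, hje, hd⟩ | ⟨m, hmk, hPm, hle⟩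
            · obtain rfl : s = j := by injection hje
              exact Or.inr ⟨0, by omega, by simpa using hP, by push_cast at hd ⊢; omega⟩
            · exact Or.inr ⟨m + 1, by omega, by simpa using hPm, by omega⟩
        · rintro ⟨k, hk, hcase⟩
          cases k with
          | zero =>
            rcases hcase with ⟨hP0, hcand⟩ | ⟨hN0, _⟩
            · rcases hcand with ⟨j, hje, hd⟩ | ⟨m, hm0, _, _⟩
              · exact absurd ((pvB_near_iff s ln).mpr ⟨j, hje, by push_cast at hd; omega⟩) hnear
              · omega
            · rw [List.getD_cons_zero] at hN0; rw [hN0] at hNw; exact absurd hNw (by simp)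
          | succ k' =>
            refine ⟨k', by simp only [List.length_cons] at hk; omega, ?_⟩
            rcases hcase with ⟨hPk, hcand⟩ | ⟨hNk, hcand⟩
            · refine Or.inl ⟨by simpa using hPk, ?_⟩
              rcases hcand with ⟨j, hje, hd⟩ | ⟨m, hmk, hNm, hle⟩
              · exact Or.inl ⟨j, hje, by push_cast at hd ⊢; omega⟩
              · cases m with
                | zero =>
                  rw [List.getD_cons_zero] at hNm; rw [hNm] at hNw; exact absurd hNw (by simp)
                | succ m' => exact Or.inr ⟨m', by omega, by simpa using hNm, by omega⟩
            · refine Or.inr ⟨by simpa using hNk, ?_⟩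
              rcases hcand with ⟨j, hje, hd⟩ | ⟨m, hmk, hPm, hle⟩
              · have hj : j ≤ s := hlp j hje
                exact Or.inl ⟨s, rfl, by push_cast at hd ⊢; omega⟩
              · cases m with
                | zero => exact Or.inl ⟨s, rfl, by omega⟩
                | succ m' => exact Or.inr ⟨m', by omega, by simpa using hPm, by omega⟩
    · rw [if_neg hP]
      have hPw : pvB_positive_indicators.contains w = false := by
        cases h : pvB_positive_indicators.contains w
        · rfl
        · exact absurd h hP
      by_cases hN : pvB_negative_indicators.contains w = true
      · rw [if_pos hN]
        by_cases hnear : pvB_near s lp = true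
        · rw [if_pos hnear]
          obtain ⟨j, hje, hj5⟩ := (pvB_near_iff s lp).mp hnear
          refine ⟨fun _ => ⟨0, by simp, Or.inr ⟨by simpa using hN, Or.inl ⟨j, hje, by push_cast; omega⟩⟩⟩,
                  fun _ => rfl⟩
        · rw [if_neg hnear, ih (s + 1) lp (some s) hlp1' hlp1]
          constructor
          · rintro ⟨k, hk, hcase⟩
            refine ⟨k + 1, by simpa using Nat.succ_lt_succ hk, ?_⟩
            rcases hcase with ⟨hPk, hcand⟩ | ⟨hNk, hcand⟩
            · refine Or.inl ⟨by simpa using hPk, ?_⟩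
              rcases hcand with ⟨j, hje, hd⟩ | ⟨m, hmk, hNm, hle⟩
              · obtain rfl : s = j := by injection hje
                exact Or.inr ⟨0, by omega, by simpa using hN, by push_cast at hd ⊢; omega⟩
              · exact Or.inr ⟨m + 1, by omega, by simpa using hNm, by omega⟩
            · refine Or.inr ⟨by simpa using hNk, ?_⟩
              rcases hcand with ⟨j, hje, hd⟩ | ⟨m, hmk, hPm, hle⟩
              · exact Or.inl ⟨j, hje, by push_cast at hd ⊢; omega⟩
              · exact Or.inr ⟨m + 1, by omega, by simpa using hPm, by omega⟩
          · rintro ⟨k, hk, hcase⟩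
            cases k with
            | zero =>
              rcases hcase with ⟨hP0, _⟩ | ⟨hN0, hcand⟩
              · rw [List.getD_cons_zero] at hP0; rw [hP0] at hPw; exact absurd hPw (by simp)
              · rcases hcand with ⟨j, hje, hd⟩ | ⟨m, hm0, _, _⟩
                · exact absurd ((pvB_near_iff s lp).mpr ⟨j, hje, by push_cast at hd; omega⟩) hnear
                · omega
            | succ k' =>
              refine ⟨k', by simp only [List.length_cons] at hk; omega, ?_⟩
              rcases hcase with ⟨hPk, hcand⟩ | ⟨hNk, hcand⟩
              · refine Or.inl ⟨by simpa using hPk, ?_⟩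
                rcases hcand with ⟨j, hje, hd⟩ | ⟨m, hmk, hNm, hle⟩
                · have hj : j ≤ s := hln j hje
                  exact Or.inl ⟨s, rfl, by push_cast at hd ⊢; omega⟩
                · cases m with
                  | zero => exact Or.inl ⟨s, rfl, by omega⟩
                  | succ m' => exact Or.inr ⟨m', by omega, by simpa using hNm, by omega⟩
              · refine Or.inr ⟨by simpa using hNk, ?_⟩
                rcases hcand with ⟨j, hje, hd⟩ | ⟨m, hmk, hPm, hle⟩
                · exact Or.inl ⟨j, hje, by push_cast at hd ⊢; omega⟩
                · cases m with
                  | zero =>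
                    rw [List.getD_cons_zero] at hPm; rw [hPm] at hPw; exact absurd hPw (by simp)
                  | succ m' => exact Or.inr ⟨m', by omega, by simpa using hPm, by omega⟩
      · rw [if_neg hN]
        have hNw : pvB_negative_indicators.contains w = false := by
          cases h : pvB_negative_indicators.contains w
          · rfl
          · exact absurd h hN
        rw [ih (s + 1) lp ln hlp1' hln1]
        constructor
        · rintro ⟨k, hk, hcase⟩
          refine ⟨k + 1, by simpa using Nat.succ_lt_succ hk, ?_⟩
          rcases hcase with ⟨hPk, hcand⟩ | ⟨hNk, hcand⟩
          · refine Or.inl ⟨by simpa using hPk, ?_⟩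
            rcases hcand with ⟨j, hje, hd⟩ | ⟨m, hmk, hNm, hle⟩
            · exact Or.inl ⟨j, hje, by push_cast at hd ⊢; omega⟩
            · exact Or.inr ⟨m + 1, by omega, by simpa using hNm, by omega⟩
          · refine Or.inr ⟨by simpa using hNk, ?_⟩
            rcases hcand with ⟨j, hje, hd⟩ | ⟨m, hmk, hPm, hle⟩
            · exact Or.inl ⟨j, hje, by push_cast at hd ⊢; omega⟩
            · exact Or.inr ⟨m + 1, by omega, by simpa using hPm, by omega⟩
        · rintro ⟨k, hk, hcase⟩
          cases k with
          | zero =>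
            rcases hcase with ⟨hP0, _⟩ | ⟨hN0, _⟩
            · rw [List.getD_cons_zero] at hP0; rw [hP0] at hPw; exact absurd hPw (by simp)
            · rw [List.getD_cons_zero] at hN0; rw [hN0] at hNw; exact absurd hNw (by simp)
          | succ k' =>
            refine ⟨k', by simp only [List.length_cons] at hk; omega, ?_⟩
            rcases hcase with ⟨hPk, hcand⟩ | ⟨hNk, hcand⟩
            · refine Or.inl ⟨by simpa using hPk, ?_⟩
              rcases hcand with ⟨j, hje, hd⟩ | ⟨m, hmk, hNm, hle⟩
              · exact Or.inl ⟨j, hje, by push_cast at hd ⊢; omega⟩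
              · cases m with
                | zero =>
                  rw [List.getD_cons_zero] at hNm; rw [hNm] at hNw; exact absurd hNw (by simp)
                | succ m' => exact Or.inr ⟨m', by omega, by simpa using hNm, by omega⟩
            · refine Or.inr ⟨by simpa using hNk, ?_⟩
              rcases hcand with ⟨j, hje, hd⟩ | ⟨m, hmk, hPm, hle⟩
              · exact Or.inl ⟨j, hje, by push_cast at hd ⊢; omega⟩
              · cases m with
                | zero =>
                  rw [List.getD_cons_zero] at hPm; rw [hPm] at hPw; exact absurd hPw (by simp)
                | succ m' => exact Or.inr ⟨m', by omega, by simpa using hPm, by omega⟩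

lemma pv_B_contrast_iff (ws : List String) :
    pvB_contrastLoop (PySem.List.enumerate ws 0) none none = true ↔ HasContrast ws := by
  rw [pv_B_loop_iff ws 0 none none (by rintro j ⟨⟩) (by rintro j ⟨⟩)]
  constructor
  · rintro ⟨k, hk, hcase⟩
    rcases hcase with ⟨hPk, hcand⟩ | ⟨hNk, hcand⟩
    · rcases hcand with ⟨j, hje, -⟩ | ⟨m, hmk, hNm, hle⟩
      · exact absurd hje (by simp)
      · exact ⟨k, m, hk, by omega, hPk, hNm, by omega, by omega⟩
    · rcases hcand with ⟨j, hje, -⟩ | ⟨m, hmk, hPm, hle⟩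
      · exact absurd hje (by simp)
      · exact ⟨m, k, by omega, hk, hPm, hNk, by omega, by omega⟩
  · rintro ⟨i, j, hi, hj, hP, hN, h1, h2⟩
    rcases lt_trichotomy i j with h | h | h
    · exact ⟨j, hj, Or.inr ⟨hN, Or.inr ⟨i, h, hP, by omega⟩⟩⟩
    · subst h
      have hfalse : pvA_negative_indicators.contains (ws.getD i "") = false := pv_disjointB _ hP
      rw [hfalse] at hN
      exact absurd hN (by simp)
    · exact ⟨i, hi, Or.inl ⟨hP, Or.inr ⟨j, h, hN, by omega⟩⟩⟩

-- ===== VERDICT (by name: the statement is the Claim_ definition above) =====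
theorem detect_sarcasm_and_irony_spec : Claim_equal_detect_sarcasm_and_irony := by
  intro text _
  unfold Spec_detect_sarcasm_and_irony detect_sarcasm_and_irony detect_sarcasm_and_irony_alt
  simp only []
  rw [show pvB_sarcasm_indicators = pvA_sarcasm_indicators from rfl]
  by_cases hc : pvA_sarcasm_indicators.any
      (fun indicator => PySem.Str.isIn indicator (PySem.Str.lower text)) = true
  · rw [if_pos hc, if_pos hc]
  · rw [if_neg hc, if_neg hc, Bool.eq_iff_iff, pv_A_contrast_iff, pv_B_contrast_iff]
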